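-- pv_equiv track=rewrite | github.com/TRAIANUSssS/RacingLine | scripts/racingline_helper.py | strip_trackmania_format_codes
-- ===== SOURCE A (Python) =====
-- def strip_trackmania_format_codes(value: str) -> str:
--     result: list[str] = []
--     i = 0
--     while i < len(value):
--         if value[i] != "$":
--             result.append(value[i])
--             i += 1
--             continue
--         if i + 3 < len(value) and all(ch in "0123456789abcdefABCDEF" for ch in value[i + 1 : i + 4]):
--             i += 4
--         else:
--             i += 2
--     return "".join(result)
-- ===== SOURCE B (Python) =====
-- HEX = set("0123456789abcdefABCDEF")
--
-- def strip_trackmania_format_codes(value: str) -> str: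
--     # Split on '$'; each later segment lost its leading code chars, unless the
--     # previous '$' already swallowed this segment's '$' (empty previous segment).
--     parts = value.split("$")
--     out = [parts[0]]
--     swallow = False
--     for part in parts[1:]:
--         if swallow:
--             out.append(part)
--             swallow = False
--         elif len(part) >= 3 and all(ch in HEX for ch in part[:3]):
--             out.append(part[3:])
--         elif part:
--             out.append(part[1:])
--         else:
--             swallow = True
--     return "".join(out)
-- ===== Notes on version B (the rewrite author's own statement) =====
-- stated objective: faster
-- what changed: B replaces A's per-character index loop by one str.split on the dollar sign plus a single pass over the segments that trims each segment's leading code characters (with a flag for a segment whose separator was swallowed by the previous code).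
import Mathlib
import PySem

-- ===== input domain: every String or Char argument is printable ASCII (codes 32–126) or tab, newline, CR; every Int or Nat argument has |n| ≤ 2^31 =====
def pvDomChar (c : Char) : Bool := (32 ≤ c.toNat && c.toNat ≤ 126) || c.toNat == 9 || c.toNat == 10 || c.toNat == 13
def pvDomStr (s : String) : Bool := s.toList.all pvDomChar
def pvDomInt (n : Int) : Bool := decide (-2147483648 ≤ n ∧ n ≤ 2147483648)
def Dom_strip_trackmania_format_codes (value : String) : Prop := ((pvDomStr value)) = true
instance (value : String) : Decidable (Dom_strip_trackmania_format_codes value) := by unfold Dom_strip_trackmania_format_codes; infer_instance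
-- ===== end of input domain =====

-- B replaces A's per-character index loop by one split on '$' plus a single pass
-- trimming each segment's leading code characters (objective: alternative decomposition).

-- ===== PORT A =====
-- A's while loop over index i, transcribed as recursion on the unread suffix
-- (advancing i by k = dropping k characters); 'i + 3 < len(value)' is '3 ≤ rest.length',
-- 'value[i+1:i+4]' is 'rest.take 3'.
def pvHexChars : List Char := "0123456789abcdefABCDEF".toList

def stripAGo : List Char → List Char
  | [] => []
  | c :: rest =>
    if c ≠ '$' then c :: stripAGo rest
    else if 3 ≤ rest.length ∧ (rest.take 3).all (fun ch => ch ∈ pvHexChars) then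
      stripAGo (rest.drop 3)
    else
      stripAGo (rest.drop 1)
termination_by l => l.length
decreasing_by all_goals simp

def strip_trackmania_format_codes (value : String) : String :=
  String.ofList (stripAGo value.toList)

-- ===== PORT B =====
-- Source B: parts = value.split("$"); keep parts[0]; fold over the rest with a swallow flag.
def pvStepB (st : List (List Char) × Bool) (part : List Char) : List (List Char) × Bool :=
  if st.2 then (st.1 ++ [part], false)
  else if 3 ≤ part.length ∧ (part.take 3).all (fun ch => ch ∈ pvHexChars) then
    (st.1 ++ [part.drop 3], false)
  else if part ≠ [] then (st.1 ++ [part.tail], false)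
  else (st.1, true)

def strip_trackmania_format_codes_alt (value : String) : String :=
  match PySem.Chars.splitOn value.toList ['$'] with
  | [] => ""   -- unreachable: str.split never returns an empty list
  | p0 :: rest => String.ofList ((rest.foldl pvStepB ([p0], false)).1.flatten)

-- ===== PRECONDITION & SPEC =====
def Spec_strip_trackmania_format_codes (value : String) (out : String) : Prop := out = strip_trackmania_format_codes_alt value
instance (value : String) (out : String) : Decidable (Spec_strip_trackmania_format_codes value out) := by unfold Spec_strip_trackmania_format_codes; infer_instance

-- ===== CLAIM (what is proved, stated in full; the proofs are below) =====
def Claim_equal_strip_trackmania_format_codes : Prop := ∀ (value : String), Dom_strip_trackmania_format_codes value → Spec_strip_trackmania_format_codes value (strip_trackmania_format_codes value)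

-- ===== LEMMAS AND PROOFS =====

-- Naive recursive characterisation of splitting on '$'.
def mySplit : List Char → List (List Char)
  | [] => [[]]
  | c :: r =>
    if c = '$' then [] :: mySplit r
    else
      match mySplit r with
      | [] => [[c]]          -- unreachable
      | p :: ps => (c :: p) :: ps

theorem mySplit_ne_nil (l : List Char) : mySplit l ≠ [] := by
  cases l with
  | nil => simp [mySplit]
  | cons c r =>
    simp only [mySplit]
    split
    · simp
    · split <;> simp

theorem splitOn_go_eq (fuel : Nat) (l cur : List Char) (acc : List (List Char))
    (h : l.length ≤ fuel) :
    PySem.Chars.splitOn.go ['$'] fuel l cur acc =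
      acc.reverse ++
        (match mySplit l with
         | [] => [cur.reverse]
         | p :: ps => (cur.reverse ++ p) :: ps) := by
  induction fuel generalizing l cur acc with
  | zero =>
    have : l = [] := by cases l <;> simp_all
    subst this
    simp [PySem.Chars.splitOn.go, mySplit]
  | succ n ih =>
    cases l with
    | nil => simp [PySem.Chars.splitOn.go, mySplit]
    | cons c rest =>
      by_cases hc : c = '$'
      · subst hc
        have hpre : List.isPrefixOf ['$'] ('$' :: rest) = true := by
          simp [List.isPrefixOf]
        rw [show PySem.Chars.splitOn.go ['$'] (n+1) ('$' :: rest) cur acc =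
              PySem.Chars.splitOn.go ['$'] n (List.drop (List.length ['$']) ('$' :: rest)) [] (cur.reverse :: acc) by
              simp [PySem.Chars.splitOn.go, hpre]]
        simp only [List.length_singleton, List.drop_succ_cons, List.drop_zero]
        rw [ih rest [] (cur.reverse :: acc) (by simpa using Nat.le_of_succ_le_succ (by simpa using h))]
        simp [mySplit]
        cases hms : mySplit rest with
        | nil => exact absurd hms (mySplit_ne_nil rest)
        | cons p ps => simp
      · have hpre : List.isPrefixOf ['$'] (c :: rest) = false := by
          simp [List.isPrefixOf]
          exact fun hh => (hc hh.symm).elim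
        rw [show PySem.Chars.splitOn.go ['$'] (n+1) (c :: rest) cur acc =
              PySem.Chars.splitOn.go ['$'] n rest (c :: cur) acc by
              simp [PySem.Chars.splitOn.go, hpre]]
        rw [ih rest (c :: cur) acc (by simpa using Nat.le_of_succ_le_succ (by simpa using h))]
        simp only [mySplit, if_neg hc]
        cases hms : mySplit rest with
        | nil => exact absurd hms (mySplit_ne_nil rest)
        | cons p ps => simp

theorem splitOn_eq_mySplit (l : List Char) :
    PySem.Chars.splitOn l ['$'] = mySplit l := by
  rw [PySem.Chars.splitOn, splitOn_go_eq (l.length+1) l [] [] (by omega)]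
  cases hms : mySplit l with
  | nil => exact absurd hms (mySplit_ne_nil l)
  | cons p ps => simp

-- Recursive form of B's fold.
def goB : Bool → List (List Char) → List (List Char)
  | _, [] => []
  | true, p :: ps => p :: goB false ps
  | false, p :: ps =>
    if 3 ≤ p.length ∧ (p.take 3).all (fun ch => ch ∈ pvHexChars) then p.drop 3 :: goB false ps
    else if p ≠ [] then p.tail :: goB false ps
    else goB true ps

theorem stepB_true (acc : List (List Char)) (p : List Char) :
    pvStepB (acc, true) p = (acc ++ [p], false) := rfl

theorem stepB_false (acc : List (List Char)) (p : List Char) :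
    pvStepB (acc, false) p =
      (if 3 ≤ p.length ∧ (p.take 3).all (fun ch => ch ∈ pvHexChars) then (acc ++ [p.drop 3], false)
       else if p ≠ [] then (acc ++ [p.tail], false)
       else (acc, true)) := rfl

theorem goB_true_cons (p : List Char) (ps : List (List Char)) :
    goB true (p :: ps) = p :: goB false ps := rfl

theorem goB_false_cons (p : List Char) (ps : List (List Char)) :
    goB false (p :: ps) =
      (if 3 ≤ p.length ∧ (p.take 3).all (fun ch => ch ∈ pvHexChars) then p.drop 3 :: goB false ps
       else if p ≠ [] then p.tail :: goB false ps
       else goB true ps) := rfl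

theorem foldB_eq (ps : List (List Char)) : ∀ (acc : List (List Char)) (sw : Bool),
    (ps.foldl pvStepB (acc, sw)).1 = acc ++ goB sw ps := by
  induction ps with
  | nil => intro acc sw; simp [goB]
  | cons p ps ih =>
    intro acc sw
    cases sw with
    | true => rw [List.foldl_cons, stepB_true, goB_true_cons]; simp [ih]
    | false =>
      rw [List.foldl_cons, stepB_false, goB_false_cons]
      split_ifs with h1 h2 <;> simp [ih]

theorem mySplit_head_prefix : ∀ (l p : List Char) (ps : List (List Char)),
    mySplit l = p :: ps → p <+: l := by
  intro l
  induction l with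
  | nil => intro p ps h; simp [mySplit] at h; simp [h.1]
  | cons c r ih =>
    intro p ps h
    by_cases hc : c = '$'
    · simp [mySplit, hc] at h
      simp [h.1]
    · simp only [mySplit, if_neg hc] at h
      cases hms : mySplit r with
      | nil => exact absurd hms (mySplit_ne_nil r)
      | cons q qs =>
        rw [hms] at h
        injection h with h1 h2
        subst h1; subst h2
        exact List.cons_prefix_cons.mpr ⟨rfl, ih q qs hms⟩

theorem hex_ne_dollar (ch : Char) (h : ch ∈ pvHexChars) : ch ≠ '$' := by
  intro hh; subst hh; revert h; decide

theorem take_eq_of_prefix {f r : List Char} (h : f <+: r) (n : Nat) (hn : n ≤ f.length) :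
    f.take n = r.take n := by
  obtain ⟨t, rfl⟩ := h
  rw [List.take_append_of_le_length hn]

theorem mySplit_dollar (r : List Char) : mySplit ('$' :: r) = [] :: mySplit r := by
  simp [mySplit]

theorem mySplit_cons {c : Char} {r f : List Char} {ps : List (List Char)}
    (hc : c ≠ '$') (h : mySplit r = f :: ps) : mySplit (c :: r) = (c :: f) :: ps := by
  simp only [mySplit, if_neg hc, h]

theorem stripAGo_eq (l : List Char) :
    stripAGo l = (match mySplit l with
                  | [] => []
                  | p :: ps => p ++ (goB false ps).flatten) := by
  induction l using stripAGo.induct with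
  | case1 => simp [stripAGo, mySplit, goB]
  | case2 c rest hc ih =>
    rw [stripAGo, if_pos hc]
    have hc' : c ≠ '$' := by simpa using hc
    cases hms : mySplit rest with
    | nil => exact absurd hms (mySplit_ne_nil rest)
    | cons p ps =>
      rw [hms] at ih
      rw [mySplit_cons hc' hms]
      show c :: stripAGo rest = (c :: p) ++ (goB false ps).flatten
      simp [ih]
  | case3 c rest hc hhex ih =>
    have hc' : c = '$' := by simpa using hc
    subst hc'
    rw [stripAGo, if_neg (by decide : ¬('$' ≠ '$')), if_pos hhex]
    obtain ⟨hlen, hall⟩ := hhex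
    obtain ⟨a, b, d, rest', rfl⟩ : ∃ a b d rest', rest = a :: b :: d :: rest' := by
      match rest, hlen with
      | a :: b :: d :: rest', _ => exact ⟨a, b, d, rest', rfl⟩
    simp only [List.take, List.all_cons, List.all_nil, Bool.and_true, Bool.and_eq_true,
      decide_eq_true_eq] at hall
    obtain ⟨ha, hb, hd⟩ := hall
    simp only [List.drop_succ_cons, List.drop_zero] at ih ⊢
    cases hms : mySplit rest' with
    | nil => exact absurd hms (mySplit_ne_nil rest')
    | cons f ps =>
      rw [hms] at ih
      have e1 : mySplit (d :: rest') = (d :: f) :: ps := mySplit_cons (hex_ne_dollar d hd) hms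
      have e2 : mySplit (b :: d :: rest') = (b :: d :: f) :: ps := mySplit_cons (hex_ne_dollar b hb) e1
      have e3 : mySplit (a :: b :: d :: rest') = (a :: b :: d :: f) :: ps := mySplit_cons (hex_ne_dollar a ha) e2
      rw [mySplit_dollar, e3]
      show stripAGo rest' = [] ++ (goB false ((a :: b :: d :: f) :: ps)).flatten
      have hx : 3 ≤ (a :: b :: d :: f).length ∧
          ((a :: b :: d :: f).take 3).all (fun ch => ch ∈ pvHexChars) := by
        refine ⟨by simp, ?_⟩
        simp [ha, hb, hd]
      rw [goB_false_cons, if_pos hx]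
      simpa using ih
  | case4 c rest hc hhex ih =>
    have hc' : c = '$' := by simpa using hc
    subst hc'
    rw [stripAGo, if_neg (by decide : ¬('$' ≠ '$')), if_neg hhex]
    cases rest with
    | nil =>
      rw [mySplit_dollar]
      show stripAGo [] = [] ++ (goB false (mySplit [])).flatten
      have : mySplit ([] : List Char) = [[]] := by simp [mySplit]
      rw [this, goB_false_cons, if_neg (by simp), if_neg (by simp)]
      simp [stripAGo, goB]
    | cons d rest' =>
      simp only [List.drop_succ_cons, List.drop_zero] at ih
      cases hms : mySplit rest' with
      | nil => exact absurd hms (mySplit_ne_nil rest')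
      | cons f ps =>
        rw [hms] at ih
        by_cases hd : d = '$'
        · subst hd
          rw [mySplit_dollar, mySplit_dollar, hms]
          show stripAGo rest' = [] ++ (goB false ([] :: f :: ps)).flatten
          rw [goB_false_cons, if_neg (by simp), if_neg (by simp), goB_true_cons]
          simpa using ih
        · rw [mySplit_dollar, mySplit_cons hd hms]
          show stripAGo rest' = [] ++ (goB false ((d :: f) :: ps)).flatten
          have hpre : f <+: rest' := mySplit_head_prefix rest' f ps hms
          have hnx : ¬ (3 ≤ (d :: f).length ∧
              ((d :: f).take 3).all (fun ch => ch ∈ pvHexChars)) := by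
            rintro ⟨hl3, hal⟩
            apply hhex
            have hf2 : 2 ≤ f.length := by simp at hl3; omega
            have hr2 : f.take 2 = rest'.take 2 := take_eq_of_prefix hpre 2 hf2
            constructor
            · have := hpre.length_le; simp; omega
            · have h1 : (d :: f).take 3 = d :: f.take 2 := by simp [List.take_succ_cons]
              rw [h1, hr2] at hal
              have h2 : (d :: rest').take 3 = d :: rest'.take 2 := by simp [List.take_succ_cons]
              simpa [h2] using hal
          rw [goB_false_cons, if_neg hnx, if_pos (by simp)]
          simpa using ih

-- ===== VERDICT (by name: the statement is the Claim_ definition above) =====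
theorem strip_trackmania_format_codes_spec : Claim_equal_strip_trackmania_format_codes := by
  intro value _
  unfold Spec_strip_trackmania_format_codes
  unfold strip_trackmania_format_codes strip_trackmania_format_codes_alt
  rw [splitOn_eq_mySplit, stripAGo_eq]
  cases hms : mySplit value.toList with
  | nil => exact absurd hms (mySplit_ne_nil _)
  | cons p ps => simp [foldB_eq]
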